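-- pv_equiv track=rewrite | github.com/VisionCode-Toolkit/segmentation-lab | classes/hough.py | non_max_on_dict
-- ===== SOURCE A (Python) =====
-- def non_max_on_dict(dictionary:dict, kernel_size):
--     key_set = set()
--     for key, item in dictionary.items():
--         for x_c in range(kernel_size):
--             for y_c in range(kernel_size):
--                 for a in range(kernel_size):
--                     for b in range(kernel_size):
--                         for theta in range(kernel_size):
--                             new_key = (key[0] + x_c,key[1] + y_c, key[2]+a, key[3]+b, key[4]+theta)
--                             if new_key in dictionary:
--                                 if dictionary[new_key] > dictionary[key]:
--                                     key_set.add(key)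
--     for key in key_set:
--         dictionary.pop(key, None)
--     return dictionary
-- ===== SOURCE B (Python) =====
-- # B: instead of enumerating all kernel_size**5 offset combinations per key (A),
-- # scan pairs of entries once and test whether the second key lies in the first
-- # key's kernel window componentwise. Same in-place mutation of `dictionary` as A.
-- def non_max_on_dict(dictionary: dict, kernel_size):
--     if kernel_size <= 0:
--         return dictionary
--     items = list(dictionary.items())
--
--     def suppressed(key):
--         return any(
--             len(k2) == 5
--             and all(0 <= k2[i] - key[i] < kernel_size for i in range(5))
--             and dictionary[k2] > dictionary[key]
--             for k2, _ in items)
--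
--     removed = [key for key, _ in items if suppressed(key)]
--     for key in removed:
--         del dictionary[key]
--     return dictionary
-- ===== Notes on version B (the rewrite author's own statement) =====
-- stated objective: alternative
-- what changed: A enumerates all kernel_size^5 offset combinations per key and probes the dict for each; B instead scans pairs of entries once and tests whether the second key lies componentwise in the first key's kernel window, removing the k^5 offset enumeration (O(N^2 * 5) vs O(N * k^5)); the return-value equivalence is proved, and B performs the same in-place removal from `dictionary` as A.
import Mathlib
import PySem

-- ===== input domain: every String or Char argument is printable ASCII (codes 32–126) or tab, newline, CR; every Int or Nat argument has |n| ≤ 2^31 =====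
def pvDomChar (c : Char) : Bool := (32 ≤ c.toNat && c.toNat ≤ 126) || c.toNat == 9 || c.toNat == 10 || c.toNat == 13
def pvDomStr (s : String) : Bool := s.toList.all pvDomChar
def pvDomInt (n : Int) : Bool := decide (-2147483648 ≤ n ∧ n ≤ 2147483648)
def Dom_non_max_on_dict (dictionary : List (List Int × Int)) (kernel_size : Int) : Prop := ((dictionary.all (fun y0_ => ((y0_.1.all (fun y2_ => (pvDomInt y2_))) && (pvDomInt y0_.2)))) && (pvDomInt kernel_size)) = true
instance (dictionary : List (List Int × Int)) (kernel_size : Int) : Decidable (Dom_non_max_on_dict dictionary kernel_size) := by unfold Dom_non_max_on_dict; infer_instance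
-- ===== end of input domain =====

-- B replaces A's kernel_size^5 offset enumeration per key by a single pairwise scan with a
-- componentwise window test (alternative algorithm); A mutates `dictionary` in place (pops the
-- suppressed keys) and B performs the same mutation — the theorems below are about the return value.

-- ===== PORT A =====
-- new_key = (key[0]+x_c, key[1]+y_c, key[2]+a, key[3]+b, key[4]+theta); Pre_ guarantees the
-- indexing is in range, so pyGetD with default 0 is exact there (totality guard only).
def nmNewKey (key : List Int) (x_c y_c a b theta : Int) : List Int :=
  [PySem.List.pyGetD key 0 0 + x_c, PySem.List.pyGetD key 1 0 + y_c,
   PySem.List.pyGetD key 2 0 + a, PySem.List.pyGetD key 3 0 + b,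
   PySem.List.pyGetD key 4 0 + theta]

def non_max_on_dict (dictionary : List (List Int × Int)) (kernel_size : Int) : List (List Int × Int) :=
  let d : PySem.Dict (List Int) Int := PySem.Dict.mk dictionary
  let key_set : PySem.Set (List Int) :=
    dictionary.foldl (fun s kv =>
      (PySem.List.pyRange 0 kernel_size 1).foldl (fun s x_c =>
        (PySem.List.pyRange 0 kernel_size 1).foldl (fun s y_c =>
          (PySem.List.pyRange 0 kernel_size 1).foldl (fun s a =>
            (PySem.List.pyRange 0 kernel_size 1).foldl (fun s b =>
              (PySem.List.pyRange 0 kernel_size 1).foldl (fun s theta =>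
                if PySem.Dict.contains d (nmNewKey kv.1 x_c y_c a b theta) &&
                   decide (PySem.Dict.getD d (nmNewKey kv.1 x_c y_c a b theta) 0 >
                           PySem.Dict.getD d kv.1 0) then
                  PySem.Set.add s kv.1
                else s) s) s) s) s) s)
      PySem.Set.empty
  (key_set.foldl (fun d' key => PySem.Dict.erase d' key) d).items

-- ===== PORT B =====
def nmWindow (kernel_size : Int) (key k2 : List Int) : Bool :=
  (k2.length == 5) &&
  (PySem.List.pyRange 0 5 1).all (fun i =>
      decide (0 ≤ PySem.List.pyGetD k2 i 0 - PySem.List.pyGetD key i 0) &&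
      decide (PySem.List.pyGetD k2 i 0 - PySem.List.pyGetD key i 0 < kernel_size))

def nmSuppressed (dictionary : List (List Int × Int)) (kernel_size : Int) (key : List Int) : Bool :=
  dictionary.any (fun kv2 =>
    nmWindow kernel_size key kv2.1 &&
    decide (PySem.Dict.getD (PySem.Dict.mk dictionary) kv2.1 0 >
            PySem.Dict.getD (PySem.Dict.mk dictionary) key 0))

def non_max_on_dict_alt (dictionary : List (List Int × Int)) (kernel_size : Int) : List (List Int × Int) :=
  if kernel_size ≤ 0 then dictionary
  else
    let removed : List (List Int) :=
      (dictionary.filter (fun kv => nmSuppressed dictionary kernel_size kv.1)).map (·.1)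
    (removed.foldl (fun d' key => PySem.Dict.erase d' key) (PySem.Dict.mk dictionary)).items

-- ===== PRECONDITION & SPEC =====
-- Pre_ excludes exactly the inputs on which the Python raises IndexError: when kernel_size ≥ 1,
-- A indexes key[0] … key[4] of every key, so every key must have length ≥ 5.
def Pre_non_max_on_dict (dictionary : List (List Int × Int)) (kernel_size : Int) : Prop :=
  0 < kernel_size → ∀ kv ∈ dictionary, 5 ≤ kv.1.length
instance (dictionary : List (List Int × Int)) (kernel_size : Int) : Decidable (Pre_non_max_on_dict dictionary kernel_size) := by unfold Pre_non_max_on_dict; infer_instance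

def pvWitness_non_max_on_dict : (List (List Int × Int)) × Int :=
  ([([0,0,0,0,0], 1), ([0,0,0,0,1], 3)], 2)

def Spec_non_max_on_dict (dictionary : List (List Int × Int)) (kernel_size : Int) (out : List (List Int × Int)) : Prop := out = non_max_on_dict_alt dictionary kernel_size
instance (dictionary : List (List Int × Int)) (kernel_size : Int) (out : List (List Int × Int)) : Decidable (Spec_non_max_on_dict dictionary kernel_size out) := by unfold Spec_non_max_on_dict; infer_instance

-- ===== CLAIM (what is proved, stated in full; the proofs are below) =====
def Claim_equal_non_max_on_dict : Prop := ∀ (dictionary : List (List Int × Int)) (kernel_size : Int), Dom_non_max_on_dict dictionary kernel_size → Pre_non_max_on_dict dictionary kernel_size → Spec_non_max_on_dict dictionary kernel_size (non_max_on_dict dictionary kernel_size)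

-- ===== LEMMAS AND PROOFS =====

-- A loop that conditionally adds one fixed element to a set is an `any` test.
theorem nm_foldl_ite_add {ι : Type} (l : List ι) (p : ι → Bool) (s : PySem.Set (List Int)) (key : List Int) :
    l.foldl (fun s x => if p x then PySem.Set.add s key else s) s
      = if l.any p then PySem.Set.add s key else s := by
  induction l generalizing s with
  | nil => simp
  | cons x l ih =>
    simp only [List.foldl_cons, List.any_cons]
    by_cases h : p x = true
    · rw [if_pos h, ih]
      have hm : key ∈ PySem.Set.add s key := by simp [PySem.Set.mem_add]
      by_cases h2 : l.any p = true
      · simp [h, h2, PySem.Set.add_of_mem hm]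
      · simp [h, h2]
    · simp only [Bool.not_eq_true] at h
      simp [h, ih]

-- Membership in A's key_set accumulator.
theorem nm_mem_foldl_cond_add (d : List (List Int × Int)) (q : List Int × Int → Bool)
    (s : PySem.Set (List Int)) (x : List Int) :
    x ∈ d.foldl (fun s kv => if q kv then PySem.Set.add s kv.1 else s) s
      ↔ x ∈ s ∨ ∃ kv ∈ d, kv.1 = x ∧ q kv = true := by
  induction d generalizing s with
  | nil => simp
  | cons kv d ih =>
    simp only [List.foldl_cons]
    by_cases h : q kv = true
    · rw [if_pos h, ih]
      simp only [PySem.Set.mem_add, List.mem_cons]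
      constructor
      · rintro (( hs | rfl) | ⟨kv', h1, h2, h3⟩)
        · exact Or.inl hs
        · exact Or.inr ⟨kv, Or.inl rfl, rfl, h⟩
        · exact Or.inr ⟨kv', Or.inr h1, h2, h3⟩
      · rintro (hs | ⟨kv', (rfl | h1), h2, h3⟩)
        · exact Or.inl (Or.inl hs)
        · exact Or.inl (Or.inr h2.symm)
        · exact Or.inr ⟨kv', h1, h2, h3⟩
    · simp only [Bool.not_eq_true] at h
      rw [if_neg (by simp [h]), ih]
      constructor
      · rintro (hs | ⟨kv', h1, h2, h3⟩)
        · exact Or.inl hs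
        · exact Or.inr ⟨kv', List.mem_cons_of_mem _ h1, h2, h3⟩
      · rintro (hs | ⟨kv', h1, h2, h3⟩)
        · exact Or.inl hs
        · rcases List.mem_cons.mp h1 with rfl | h1
          · rw [h] at h3; cases h3
          · exact Or.inr ⟨kv', h1, h2, h3⟩

-- Folding `erase` over a list of keys filters all entries with those keys (Python dict.pop).
theorem nm_items_foldl_erase (L : List (List Int)) (d0 : PySem.Dict (List Int) Int) :
    (L.foldl (fun d' key => PySem.Dict.erase d' key) d0).items
      = d0.items.filter (fun kv => decide (kv.1 ∉ L)) := by
  induction L generalizing d0 with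
  | nil => simp
  | cons x L ih =>
    rw [List.foldl_cons, ih]
    have he : (PySem.Dict.erase d0 x).items = d0.items.filter (fun p => !(p.1 == x)) := rfl
    rw [he, List.filter_filter]
    apply List.filter_congr
    intro kv _
    rcases Decidable.em (kv.1 = x) with h | h
    · simp [List.mem_cons, h]
    · have h' : ¬(x = kv.1) := fun e => h e.symm
      rcases Decidable.em (kv.1 ∈ L) with h2 | h2 <;> simp [List.mem_cons, h, h', h2]

-- Every length-5 list of ints is the literal list of its first five pyGetD values.
theorem nm_eq_five (l : List Int) (h : l.length = 5) :
    l = [PySem.List.pyGetD l 0 0, PySem.List.pyGetD l 1 0, PySem.List.pyGetD l 2 0,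
         PySem.List.pyGetD l 3 0, PySem.List.pyGetD l 4 0] := by
  match l, h with
  | [a, b, c, d, e], _ => simp [PySem.List.pyGetD, PySem.List.pyIdx?, PySem.List.pyGet?]

-- Core: A's kernel_size^5 offset probe is B's pairwise window test (as existentials over d).
theorem nm_cond_iff (d : List (List Int × Int)) (k : Int) (key : List Int) :
    ((PySem.List.pyRange 0 k 1).any (fun x_c =>
      (PySem.List.pyRange 0 k 1).any (fun y_c =>
        (PySem.List.pyRange 0 k 1).any (fun a =>
          (PySem.List.pyRange 0 k 1).any (fun b =>
            (PySem.List.pyRange 0 k 1).any (fun theta =>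
              PySem.Dict.contains (PySem.Dict.mk d) (nmNewKey key x_c y_c a b theta) &&
              decide (PySem.Dict.getD (PySem.Dict.mk d) (nmNewKey key x_c y_c a b theta) 0 >
                      PySem.Dict.getD (PySem.Dict.mk d) key 0))))))) = true
    ↔ nmSuppressed d k key = true := by
  have hcont : ∀ nk : List Int, PySem.Dict.contains (PySem.Dict.mk d) nk = true ↔ ∃ kv2 ∈ d, kv2.1 = nk := by
    intro nk
    rw [PySem.Dict.contains_iff_mem_keys]
    simp [PySem.Dict.keys, PySem.Dict.items]
  have hR5 : PySem.List.pyRange 0 5 1 = [0, 1, 2, 3, 4] := by decide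
  simp only [nmSuppressed, nmWindow, hR5, List.any_eq_true, List.all_cons, List.all_nil,
    Bool.and_eq_true, decide_eq_true_eq, beq_iff_eq, PySem.List.mem_pyRange_one, Bool.and_true]
  constructor
  · rintro ⟨x, hx, y, hy, a, ha, b, hb, t, ht, hc, hgt⟩
    obtain ⟨kv2, hmem, hk2⟩ := (hcont _).mp hc
    refine ⟨kv2, hmem, ⟨by rw [hk2]; rfl, ?_⟩, by rw [hk2]; exact hgt⟩
    rw [hk2]
    simp only [nmNewKey, PySem.List.pyGetD_ofNat', List.getD]
    norm_num
    omega
  · rintro ⟨kv2, hmem, ⟨hlen, hb0, hb1, hb2, hb3, hb4⟩, hgt⟩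
    have hk2 : kv2.1 = nmNewKey key
        (PySem.List.pyGetD kv2.1 0 0 - PySem.List.pyGetD key 0 0)
        (PySem.List.pyGetD kv2.1 1 0 - PySem.List.pyGetD key 1 0)
        (PySem.List.pyGetD kv2.1 2 0 - PySem.List.pyGetD key 2 0)
        (PySem.List.pyGetD kv2.1 3 0 - PySem.List.pyGetD key 3 0)
        (PySem.List.pyGetD kv2.1 4 0 - PySem.List.pyGetD key 4 0) := by
      conv_lhs => rw [nm_eq_five kv2.1 hlen]
      simp only [nmNewKey]
      norm_num
    refine ⟨_, ?_, _, ?_, _, ?_, _, ?_, _, ?_, (hcont _).mpr ⟨kv2, hmem, hk2⟩, by rw [← hk2]; exact hgt⟩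
    all_goals omega

-- ===== VERDICT (by name: the statement is the Claim_ definition above) =====
theorem non_max_on_dict_spec : Claim_equal_non_max_on_dict := by
  intro d k _ _
  unfold Spec_non_max_on_dict non_max_on_dict non_max_on_dict_alt
  by_cases hk : k ≤ 0
  · have hnil : PySem.List.pyRange 0 k 1 = [] := PySem.List.pyRange_one_eq_nil hk
    simp [hnil, hk, PySem.List.foldl_ignore, nm_items_foldl_erase, PySem.Set.empty,
      PySem.Dict.items]
  · rw [if_neg hk]
    simp only [nm_foldl_ite_add, nm_items_foldl_erase]
    show List.filter _ (PySem.Dict.mk d).items = List.filter _ (PySem.Dict.mk d).items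
    apply List.filter_congr
    intro kv hkv
    rw [decide_eq_decide]
    apply not_congr
    rw [nm_mem_foldl_cond_add]
    simp only [PySem.Set.empty, List.not_mem_nil, false_or, List.mem_map, List.mem_filter]
    constructor
    · rintro ⟨kv', h1, h2, h3⟩
      exact ⟨kv', ⟨h1, ((nm_cond_iff d k kv'.1).mp h3)⟩, h2⟩
    · rintro ⟨kv', ⟨h1, h3⟩, h2⟩
      exact ⟨kv', h1, h2, (nm_cond_iff d k kv'.1).mpr h3⟩
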